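-- pv_equiv track=rewrite | github.com/nnatchy/Python-2021-1 | grader homework/09/09_NestedList_★★★_Fill_In_Numbers.py | pattern2
-- ===== SOURCE A (Python) =====
-- def pattern2(nrows, ncols):
--     final = []
--     templist = []
--     k = 1
--     for i in range(3):
--         for j in range(k, nrows*ncols+1, 3):
--             templist.append(j)
--         final.append(templist)
--         templist = []
--         k += 1
--     return final
-- ===== SOURCE B (Python) =====
-- def pattern2(nrows, ncols):
--     b0, b1, b2 = [], [], []
--     for n in range(1, nrows * ncols + 1):
--         r = (n - 1) % 3
--         if r == 0:
--             b0.append(n)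
--         elif r == 1:
--             b1.append(n)
--         else:
--             b2.append(n)
--     return [b0, b1, b2]
-- ===== Notes on version B (the rewrite author's own statement) =====
-- stated objective: alternative
-- what changed: Replaces A's three strided passes (one per offset k=1,2,3) with a single forward scan over 1..nrows*ncols that routes each number to its residue-class bucket by (n-1) % 3.
import Mathlib
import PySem

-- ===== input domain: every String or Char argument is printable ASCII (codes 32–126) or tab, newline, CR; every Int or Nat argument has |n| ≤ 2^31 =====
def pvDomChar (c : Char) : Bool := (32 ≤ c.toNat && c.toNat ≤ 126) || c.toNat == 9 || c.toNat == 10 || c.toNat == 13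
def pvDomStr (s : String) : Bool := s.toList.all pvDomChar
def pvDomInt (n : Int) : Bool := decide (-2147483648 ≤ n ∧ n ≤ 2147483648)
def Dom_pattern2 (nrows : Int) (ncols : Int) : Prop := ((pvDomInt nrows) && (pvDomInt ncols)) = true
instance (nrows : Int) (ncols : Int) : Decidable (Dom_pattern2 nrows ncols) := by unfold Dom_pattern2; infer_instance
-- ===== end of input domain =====

-- B replaces A's three strided passes (offsets 1,2,3) with one forward scan that
-- distributes each number into its residue-class bucket (objective: alternative decomposition).


-- ===== PORT A =====
-- outer loop: state = (final, k); inner loop appends j to templist (started empty each round)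
def pattern2 (nrows : Int) (ncols : Int) : List (List Int) :=
  ((PySem.List.pyRange 0 3 1).foldl
    (fun (st : List (List Int) × Int) _i =>
      let templist := (PySem.List.pyRange st.2 (nrows * ncols + 1) 3).foldl
        (fun (t : List Int) j => t ++ [j]) []
      (st.1 ++ [templist], st.2 + 1))
    ([], 1)).1

-- ===== PORT B =====
-- one step of B's distributing loop: route n into the bucket of residue (n-1) % 3
def pvRoute (b : List Int × List Int × List Int) (n : Int) : List Int × List Int × List Int :=
  let r := PySem.Int.mod (n - 1) 3
  if r = 0 then (b.1 ++ [n], b.2.1, b.2.2)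
  else if r = 1 then (b.1, b.2.1 ++ [n], b.2.2)
  else (b.1, b.2.1, b.2.2 ++ [n])

def pattern2_alt (nrows : Int) (ncols : Int) : List (List Int) :=
  let res := (PySem.List.pyRange 1 (nrows * ncols + 1) 1).foldl pvRoute ([], [], [])
  [res.1, res.2.1, res.2.2]

-- ===== PRECONDITION & SPEC =====
def Spec_pattern2 (nrows : Int) (ncols : Int) (out : List (List Int)) : Prop := out = pattern2_alt nrows ncols
instance (nrows : Int) (ncols : Int) (out : List (List Int)) : Decidable (Spec_pattern2 nrows ncols out) := by unfold Spec_pattern2; infer_instance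

-- ===== CLAIM (what is proved, stated in full; the proofs are below) =====
def Claim_equal_pattern2 : Prop := ∀ (nrows : Int) (ncols : Int), Dom_pattern2 nrows ncols → Spec_pattern2 nrows ncols (pattern2 nrows ncols)

-- ===== LEMMAS AND PROOFS =====

lemma foldl_app (l acc : List Int) : l.foldl (fun t j => t ++ [j]) acc = acc ++ l := by
  induction l generalizing acc with
  | nil => simp
  | cons x xs ih => simp [List.foldl, ih]

-- A's result is the three strided ranges
lemma pattern2_eq (nrows ncols : Int) :
    pattern2 nrows ncols =
      [PySem.List.pyRange 1 (nrows * ncols + 1) 3,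
       PySem.List.pyRange 2 (nrows * ncols + 1) 3,
       PySem.List.pyRange 3 (nrows * ncols + 1) 3] := by
  have h3 : PySem.List.pyRange 0 3 1 = [0, 1, 2] := by decide
  unfold pattern2
  rw [h3]
  simp only [List.foldl, foldl_app]
  simp

lemma mod3 (n : Int) : PySem.Int.mod n 3 = n % 3 := by
  simp [PySem.Int.mod]; rw [Int.fmod_eq_emod]; simp

-- extending a step-3 range by one at the right end
lemma step3_succ (k b : Int) (h : k ≤ b + 2) :
    PySem.List.pyRange k (b + 1) 3 =
      PySem.List.pyRange k b 3 ++ (if (b - k) % 3 = 0 then [b] else []) := by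
  rw [PySem.List.pyRange_of_pos k (b + 1) (by norm_num),
      PySem.List.pyRange_of_pos k b (by norm_num)]
  by_cases hm : (b - k) % 3 = 0
  · by_cases hkb : k ≤ b
    · have hlt : k < b + 1 := by omega
      have hn1 : (if k < b + 1 then ((b + 1 - k + 3 - 1) / 3).toNat else 0)
          = (if k < b then ((b - k + 3 - 1) / 3).toNat else 0) + 1 := by
        split_ifs <;> omega
      rw [hn1, List.range_succ, List.map_append]
      simp only [hm, if_pos]
      congr 1
      simp only [List.map_cons, List.map_nil]
      congr 1
      split_ifs with h2
      · omega
      · omega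
    · -- b < k ≤ b+2 and 3 ∣ b - k : impossible
      omega
  · -- residue nonzero: the count does not change
    have hn1 : (if k < b + 1 then ((b + 1 - k + 3 - 1) / 3).toNat else 0)
        = (if k < b then ((b - k + 3 - 1) / 3).toNat else 0) := by
      split_ifs <;> omega
    rw [hn1]
    simp [hm]

-- B's fold over 1..m lands exactly in the three strided ranges
lemma bfold (m : Nat) :
    (PySem.List.pyRange 1 (1 + (m : Int)) 1).foldl pvRoute ([], [], []) =
      (PySem.List.pyRange 1 (1 + (m : Int)) 3,
       PySem.List.pyRange 2 (1 + (m : Int)) 3,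
       PySem.List.pyRange 3 (1 + (m : Int)) 3) := by
  induction m with
  | zero =>
      simp only [Nat.cast_zero, add_zero]
      rw [PySem.List.pyRange_one_eq_nil (by norm_num)]
      rw [PySem.List.pyRange_of_pos 1 1 (by norm_num),
          PySem.List.pyRange_of_pos 2 1 (by norm_num),
          PySem.List.pyRange_of_pos 3 1 (by norm_num)]
      norm_num
  | succ m ih =>
      push_cast
      rw [show (1 : Int) + ((m : Int) + 1) = (1 + (m : Int)) + 1 by ring]
      rw [PySem.List.pyRange_one_succ_right (a := 1) (b := 1 + (m : Int)) (by omega)]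
      rw [List.foldl_append, ih]
      simp only [List.foldl]
      rw [step3_succ 1 (1 + (m : Int)) (by omega),
          step3_succ 2 (1 + (m : Int)) (by omega),
          step3_succ 3 (1 + (m : Int)) (by omega)]
      unfold pvRoute
      rw [mod3]
      have hm : (1 + (m : Int) - 1) % 3 = (m : Int) % 3 := by ring_nf
      by_cases h0 : ((m : Int)) % 3 = 0
      · simp only [hm, h0]
        norm_num
        omega
      · by_cases h1 : ((m : Int)) % 3 = 1
        · simp only [hm, h1]
          norm_num
          omega
        · have h2 : ((m : Int)) % 3 = 2 := by omega
          simp only [hm, h2]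
          norm_num
          omega

-- ===== VERDICT (by name: the statement is the Claim_ definition above) =====
theorem pattern2_spec : Claim_equal_pattern2 := by
  intro nrows ncols _
  unfold Spec_pattern2
  rw [pattern2_eq]
  unfold pattern2_alt
  by_cases hN : nrows * ncols ≤ 0
  · have h1 : PySem.List.pyRange 1 (nrows * ncols + 1) 1 = [] :=
      PySem.List.pyRange_one_eq_nil (by omega)
    rw [h1]
    rw [PySem.List.pyRange_of_pos 1 (nrows * ncols + 1) (by norm_num),
        PySem.List.pyRange_of_pos 2 (nrows * ncols + 1) (by norm_num),
        PySem.List.pyRange_of_pos 3 (nrows * ncols + 1) (by norm_num)]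
    rw [if_neg (by omega), if_neg (by omega), if_neg (by omega)]
    simp [List.foldl]
  · have hpos : 0 < nrows * ncols := by omega
    have hcast : nrows * ncols + 1 = 1 + ((nrows * ncols).toNat : Int) := by omega
    rw [hcast, bfold (nrows * ncols).toNat]
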